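-- pv_equiv track=rewrite | github.com/sglee487/Coding-test | Backjoon/1525-퍼즐.py | m2l
-- ===== SOURCE A (Python) =====
-- def m2l(matrix):
--     num = 0
--     index = -1
--     for r in range(3):
--         for c in range(3):
--             if matrix[r][c] == 0:
--                 index = (3*r) + c
--             num += (matrix[r][c] * ((1000 ** r ) * (10 ** c)))
--     return num, index
-- ===== SOURCE B (Python) =====
-- def m2l(matrix):
--     cells = [matrix[r][c] for r in range(3) for c in range(3)]
--     num = 0
--     for x in reversed(cells):
--         num = num * 10 + x
--     index = -1
--     for i in range(8, -1, -1):
--         if cells[i] == 0: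
--             index = i
--             break
--     return num, index
-- ===== Notes on version B (the rewrite author's own statement) =====
-- stated objective: alternative
-- what changed: B flattens the 3x3 matrix once into nine row-major cells, computes num by Horner's rule (num = num*10 + cell from position 8 downward, no explicit powers), and finds the blank index by a reverse scan that stops at the first zero, instead of A's nested row/column loops accumulating explicit 1000^r*10^c weights and last-assignment-wins index updates.
import Mathlib
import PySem

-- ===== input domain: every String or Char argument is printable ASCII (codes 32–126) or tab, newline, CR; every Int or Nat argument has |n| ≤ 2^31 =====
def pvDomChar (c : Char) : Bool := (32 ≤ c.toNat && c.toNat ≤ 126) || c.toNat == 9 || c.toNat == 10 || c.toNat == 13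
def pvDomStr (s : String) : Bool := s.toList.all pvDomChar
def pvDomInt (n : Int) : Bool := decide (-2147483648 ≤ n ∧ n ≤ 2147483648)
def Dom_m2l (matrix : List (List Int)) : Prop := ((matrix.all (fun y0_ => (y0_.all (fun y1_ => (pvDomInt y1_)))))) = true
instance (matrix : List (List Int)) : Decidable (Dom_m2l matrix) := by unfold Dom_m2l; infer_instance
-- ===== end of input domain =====

-- B flattens the 3x3 cells once and computes num by Horner (num = num*10 + cell from position 8 down),
-- finding the blank index by a reverse scan stopping at the first (= last row-major) zero.

-- ===== PORT A =====
-- literal port of A's nested range(3) loops over state (num, index); indices are the literals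
-- 0..2 (never negative), so getD is exact wherever A does not raise (raising inputs are outside Pre_)
def m2l (matrix : List (List Int)) : Int × Int :=
  (List.range 3).foldl (fun s r =>
    (List.range 3).foldl (fun s c =>
      let v := (matrix.getD r []).getD c 0
      let index : Int := if v = 0 then ((3 * r + c : Nat) : Int) else s.2
      (s.1 + v * ((1000 ^ r) * (10 ^ c)), index)) s) (0, -1)

-- ===== PORT B =====
-- port of Source B: flatten the nine cells, Horner over the reversed cells, reverse scan with break
def m2l_alt (matrix : List (List Int)) : Int × Int :=
  let cells := (List.range 3).flatMap (fun r =>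
    (List.range 3).map (fun c => (matrix.getD r []).getD c 0))
  let num := cells.reverse.foldl (fun acc x => acc * 10 + x) 0
  let index : Int := (((List.range 9).map (fun k => 8 - k)).findSome? (fun i =>
    if cells.getD i 1 = 0 then some ((i : Nat) : Int) else none)).getD (-1)
  (num, index)

-- ===== PRECONDITION & SPEC =====
-- Pre_ excludes exactly the inputs where A raises IndexError: fewer than 3 rows, or one of the first 3 rows shorter than 3
def Pre_m2l (matrix : List (List Int)) : Prop :=
  3 ≤ matrix.length ∧ ∀ row ∈ matrix.take 3, 3 ≤ row.length
instance (matrix : List (List Int)) : Decidable (Pre_m2l matrix) := by unfold Pre_m2l; infer_instance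
def pvWitness_m2l : List (List Int) := [[1, 2, 3], [4, 5, 6], [7, 8, 0]]

def Spec_m2l (matrix : List (List Int)) (out : Int × Int) : Prop := out = m2l_alt matrix
instance (matrix : List (List Int)) (out : Int × Int) : Decidable (Spec_m2l matrix out) := by unfold Spec_m2l; infer_instance

-- ===== CLAIM (what is proved, stated in full; the proofs are below) =====
def Claim_equal_m2l : Prop := ∀ (matrix : List (List Int)), Dom_m2l matrix → Pre_m2l matrix → Spec_m2l matrix (m2l matrix)

-- ===== LEMMAS AND PROOFS =====

-- ===== VERDICT (by name: the statement is the Claim_ definition above) =====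
set_option maxHeartbeats 2000000 in
theorem m2l_spec : Claim_equal_m2l := by
  intro matrix _ pre
  obtain ⟨hlen, hrows⟩ := pre
  match matrix, hlen with
  | (a0 :: a1 :: a2 :: _) :: (b0 :: b1 :: b2 :: _) :: (c0 :: c1 :: c2 :: _) :: rest, _ =>
    simp only [Spec_m2l, m2l, m2l_alt, List.range_succ, List.range_zero, List.nil_append,
      List.cons_append, List.foldl_cons, List.foldl_nil, List.flatMap_cons, List.flatMap_nil,
      List.map_cons, List.map_nil, List.getD, List.getElem?_cons_zero, List.getElem?_cons_succ,
      List.reverse_cons, List.reverse_nil,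
      List.findSome?, List.append_nil, Option.getD_some]
    norm_num
    constructor
    · ring
    · split_ifs <;> rfl
  | [], h => simp at h
  | [_], h => simp at h
  | [_, _], h => simp at h
  | [] :: _, _ => exact absurd (hrows [] (by simp)) (by simp)
  | [x] :: _, _ => exact absurd (hrows [x] (by simp)) (by simp)
  | [x, y] :: _, _ => exact absurd (hrows [x, y] (by simp)) (by simp)
  | _ :: [] :: _, _ => exact absurd (hrows [] (by simp)) (by simp)
  | _ :: [x] :: _, _ => exact absurd (hrows [x] (by simp)) (by simp)
  | _ :: [x, y] :: _, _ => exact absurd (hrows [x, y] (by simp)) (by simp)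
  | _ :: _ :: [] :: _, _ => exact absurd (hrows [] (by simp)) (by simp)
  | _ :: _ :: [x] :: _, _ => exact absurd (hrows [x] (by simp)) (by simp)
  | _ :: _ :: [x, y] :: _, _ => exact absurd (hrows [x, y] (by simp)) (by simp)
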